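-- pv_equiv track=rewrite | github.com/Afei99357/nifi_to_databricks | tools/nifi_processor_classifier_tool.py | _get_impact_breakdown
-- ===== SOURCE A (Python) =====
-- from typing import Any, Dict, List
--
-- def _get_impact_breakdown(analysis_results: List[Dict[str, Any]]) -> Dict[str, Any]:
--     """Get breakdown of processor impact levels."""
--     breakdown = {"high": 0, "medium": 0, "low": 0, "none": 0}
--
--     for result in analysis_results:
--         impact = result.get("data_impact_level", "low")
--         if impact in breakdown:
--             breakdown[impact] += 1
--         else:
--             breakdown["low"] += 1
--
--     return breakdown
-- ===== SOURCE B (Python) =====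
-- from typing import Any, Dict, List
--
-- def _get_impact_breakdown(analysis_results: List[Dict[str, Any]]) -> Dict[str, Any]:
--     """Get breakdown of processor impact levels."""
--     total = len(analysis_results)
--     high = sum(1 for r in analysis_results if r.get("data_impact_level", "low") == "high")
--     medium = sum(1 for r in analysis_results if r.get("data_impact_level", "low") == "medium")
--     none_count = sum(1 for r in analysis_results if r.get("data_impact_level", "low") == "none")
--     return {
--         "high": high,
--         "medium": medium,
--         "low": total - high - medium - none_count,
--         "none": none_count,
--     }
-- ===== Notes on version B (the rewrite author's own statement) =====
-- stated objective: alternative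
-- what changed: Replaces the mutable-dict accumulation loop with three direct count passes for the explicit levels and derives the 'low' bucket by subtraction from the total, so the fallback branch disappears.
import Mathlib
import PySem

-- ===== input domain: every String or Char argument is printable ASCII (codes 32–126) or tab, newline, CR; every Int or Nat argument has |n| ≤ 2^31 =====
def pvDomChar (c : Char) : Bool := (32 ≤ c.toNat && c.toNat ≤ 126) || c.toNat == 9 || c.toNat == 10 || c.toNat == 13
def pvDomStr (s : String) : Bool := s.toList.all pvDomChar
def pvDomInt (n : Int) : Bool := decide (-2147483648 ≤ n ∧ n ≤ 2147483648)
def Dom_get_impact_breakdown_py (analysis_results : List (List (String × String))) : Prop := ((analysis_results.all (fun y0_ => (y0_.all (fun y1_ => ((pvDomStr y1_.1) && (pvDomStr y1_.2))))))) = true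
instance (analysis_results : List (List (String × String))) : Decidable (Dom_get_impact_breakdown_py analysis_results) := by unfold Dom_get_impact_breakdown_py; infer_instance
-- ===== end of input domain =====

-- B replaces A's mutable-dict accumulation loop by three direct level counts and derives
-- the 'low' bucket by subtraction from the total (objective: alternative decomposition).

-- ===== PORT A =====
-- result.get("data_impact_level", "low"): first match in the association list, default "low"
def pvImpactOf (result : List (String × String)) : String :=
  (result.lookup "data_impact_level").getD "low"

def pvStepA (d : PySem.Dict String Int) (result : List (String × String)) : PySem.Dict String Int :=
  let impact := pvImpactOf result
  if d.contains impact then d.insert impact (d.getD impact 0 + 1)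
  else d.insert "low" (d.getD "low" 0 + 1)

def get_impact_breakdown_py (analysis_results : List (List (String × String))) : List (String × Int) :=
  (analysis_results.foldl pvStepA
    (PySem.Dict.mk [("high", 0), ("medium", 0), ("low", 0), ("none", 0)])).items

-- ===== PORT B =====
def pvCountLevel (analysis_results : List (List (String × String))) (lvl : String) : Int :=
  (analysis_results.countP (fun r => pvImpactOf r == lvl) : Int)

def get_impact_breakdown_py_alt (analysis_results : List (List (String × String))) : List (String × Int) :=
  let total : Int := analysis_results.length
  let high := pvCountLevel analysis_results "high"
  let medium := pvCountLevel analysis_results "medium"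
  let noneC := pvCountLevel analysis_results "none"
  [("high", high), ("medium", medium), ("low", total - high - medium - noneC), ("none", noneC)]

-- ===== PRECONDITION & SPEC =====
def Spec_get_impact_breakdown_py (analysis_results : List (List (String × String))) (out : List (String × Int)) : Prop := out = get_impact_breakdown_py_alt analysis_results
instance (analysis_results : List (List (String × String))) (out : List (String × Int)) : Decidable (Spec_get_impact_breakdown_py analysis_results out) := by unfold Spec_get_impact_breakdown_py; infer_instance

-- ===== CLAIM (what is proved, stated in full; the proofs are below) =====
def Claim_equal_get_impact_breakdown_py : Prop := ∀ (analysis_results : List (List (String × String))), Dom_get_impact_breakdown_py analysis_results → Spec_get_impact_breakdown_py analysis_results (get_impact_breakdown_py analysis_results)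

-- ===== LEMMAS AND PROOFS =====

-- one step of A's loop on the four-slot state: bump the matched slot, else the 'low' slot
lemma pv_step_eval (s : String) (h m l n : Int) :
    (let d := PySem.Dict.mk [("high", h), ("medium", m), ("low", l), ("none", n)]
     if d.contains s then d.insert s (d.getD s 0 + 1) else d.insert "low" (d.getD "low" 0 + 1))
    = if s = "high" then PySem.Dict.mk [("high", h + 1), ("medium", m), ("low", l), ("none", n)]
      else if s = "medium" then PySem.Dict.mk [("high", h), ("medium", m + 1), ("low", l), ("none", n)]
      else if s = "none" then PySem.Dict.mk [("high", h), ("medium", m), ("low", l), ("none", n + 1)]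
      else PySem.Dict.mk [("high", h), ("medium", m), ("low", l + 1), ("none", n)] := by
  by_cases h1 : s = "high"
  · subst h1; simp [PySem.Dict.contains, PySem.Dict.insert, PySem.Dict.getD, PySem.Dict.get?]
  by_cases h2 : s = "medium"
  · subst h2; simp [PySem.Dict.contains, PySem.Dict.insert, PySem.Dict.getD, PySem.Dict.get?]
  by_cases h3 : s = "none"
  · subst h3; simp [PySem.Dict.contains, PySem.Dict.insert, PySem.Dict.getD, PySem.Dict.get?]
  by_cases h4 : s = "low"
  · subst h4; simp [PySem.Dict.contains, PySem.Dict.insert, PySem.Dict.getD, PySem.Dict.get?]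
  · have h1' : ¬ ("high" = s) := fun e => h1 e.symm
    have h2' : ¬ ("medium" = s) := fun e => h2 e.symm
    have h3' : ¬ ("none" = s) := fun e => h3 e.symm
    have h4' : ¬ ("low" = s) := fun e => h4 e.symm
    simp [PySem.Dict.contains, PySem.Dict.insert, PySem.Dict.getD, PySem.Dict.get?,
      h1, h2, h3, h1', h2', h3', h4']

-- counting a level splits off the head element
lemma pv_count_cons (r : List (String × String)) (rs : List (List (String × String))) (lvl : String) :
    pvCountLevel (r :: rs) lvl = (if pvImpactOf r = lvl then 1 else 0) + pvCountLevel rs lvl := by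
  by_cases hp : pvImpactOf r = lvl
  · simp [pvCountLevel, hp]; omega
  · simp [pvCountLevel, List.countP_cons, hp]

-- loop invariant: from any four-slot state, A's loop adds the exact counts to the
-- 'high'/'medium'/'none' slots and the remainder to the 'low' slot.
lemma pv_loop_inv (rs : List (List (String × String))) (h m l n : Int) :
    (rs.foldl pvStepA (PySem.Dict.mk [("high", h), ("medium", m), ("low", l), ("none", n)])).items
    = [("high", h + pvCountLevel rs "high"),
       ("medium", m + pvCountLevel rs "medium"),
       ("low", l + ((rs.length : Int) - pvCountLevel rs "high" - pvCountLevel rs "medium" - pvCountLevel rs "none")),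
       ("none", n + pvCountLevel rs "none")] := by
  induction rs generalizing h m l n with
  | nil => simp [pvCountLevel]
  | cons r rs ih =>
    have hstep : pvStepA (PySem.Dict.mk [("high", h), ("medium", m), ("low", l), ("none", n)]) r
        = if pvImpactOf r = "high" then PySem.Dict.mk [("high", h + 1), ("medium", m), ("low", l), ("none", n)]
          else if pvImpactOf r = "medium" then PySem.Dict.mk [("high", h), ("medium", m + 1), ("low", l), ("none", n)]
          else if pvImpactOf r = "none" then PySem.Dict.mk [("high", h), ("medium", m), ("low", l), ("none", n + 1)]
          else PySem.Dict.mk [("high", h), ("medium", m), ("low", l + 1), ("none", n)] := by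
      exact pv_step_eval (pvImpactOf r) h m l n
    simp only [List.foldl_cons, hstep, pv_count_cons, List.length_cons]
    split_ifs with h1 h2 h3 <;> simp_all [ih] <;>
      try (push_cast; ring)
    all_goals exact ⟨trivial, trivial⟩

-- ===== VERDICT (by name: the statement is the Claim_ definition above) =====
theorem get_impact_breakdown_py_spec : Claim_equal_get_impact_breakdown_py := by
  intro rs _
  unfold Spec_get_impact_breakdown_py get_impact_breakdown_py get_impact_breakdown_py_alt
  rw [pv_loop_inv]
  simp
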